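-- pv_equiv track=rewrite | github.com/bopopescu/lazero | scheme/lazero/networkx_research/findImportable.py | getFinal
-- ===== SOURCE A (Python) =====
-- def getFinal(b,a):
--     # first bracket.
--     c = a[len(b):]
--     d = ""
--     e = [" ", "("]
--     # hook in.
--     for x in c:
--         if x in e:
--             if d == "":
--                 pass
--             else:
--                 return d
--         else:
--             d+=x
-- ===== SOURCE B (Python) =====
-- def getFinal(b, a):
--     # strip the prefix and the leading delimiters, then cut at the next delimiter
--     c = a[len(b):].lstrip(" (")
--     for i, ch in enumerate(c):
--         if ch in " (":
--             return c[:i]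
--     return None
-- ===== Notes on version B (the rewrite author's own statement) =====
-- stated objective: idiomatic
-- what changed: Replaces the accumulate-into-d character loop with a two-phase lstrip of leading delimiters followed by a scan for the first closing delimiter, slicing the token out.
import Mathlib
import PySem

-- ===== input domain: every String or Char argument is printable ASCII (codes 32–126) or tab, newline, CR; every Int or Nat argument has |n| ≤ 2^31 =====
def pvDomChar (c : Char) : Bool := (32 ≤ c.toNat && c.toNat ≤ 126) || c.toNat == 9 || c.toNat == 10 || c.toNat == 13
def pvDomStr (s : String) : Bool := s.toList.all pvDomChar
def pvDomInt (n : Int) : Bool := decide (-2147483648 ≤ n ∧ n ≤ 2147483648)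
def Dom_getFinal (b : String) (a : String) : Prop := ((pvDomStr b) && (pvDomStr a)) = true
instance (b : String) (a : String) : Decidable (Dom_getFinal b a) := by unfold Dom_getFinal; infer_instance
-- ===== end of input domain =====

-- B replaces A's accumulate-into-d character loop by lstrip-of-leading-delimiters + find-first-delimiter-and-slice (idiomatic; same cost).


-- ===== PORT A =====
-- x in e with e = [" ", "("]: single-char membership, exact as char comparison
def pvIsDelim (x : Char) : Bool := x = ' ' || x = '('

-- the 'for x in c' loop with accumulator d; early 'return d' / implicit 'return None'
def getFinalLoop : List Char → List Char → Option String
  | [], _ => none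
  | x :: rest, d =>
    if pvIsDelim x then
      (if d = [] then getFinalLoop rest d else some (String.mk d))
    else getFinalLoop rest (d ++ [x])

-- a[len(b):] with a nonnegative index is exactly List.drop on the chars
def getFinal (b : String) (a : String) : Option String :=
  getFinalLoop (a.toList.drop b.length) []

-- ===== PORT B =====
-- c = a[len(b):].lstrip(" (") ; scan for first delimiter index; c[:i] or None
def getFinal_alt (b : String) (a : String) : Option String :=
  let c := (a.toList.drop b.length).dropWhile pvIsDelim
  match c.findIdx? pvIsDelim with
  | some i => some (String.mk (c.take i))
  | none => none

-- ===== PRECONDITION & SPEC =====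
def Spec_getFinal (b : String) (a : String) (out : Option String) : Prop := out = getFinal_alt b a
instance (b : String) (a : String) (out : Option String) : Decidable (Spec_getFinal b a out) := by unfold Spec_getFinal; infer_instance

-- ===== CLAIM (what is proved, stated in full; the proofs are below) =====
def Claim_equal_getFinal : Prop := ∀ (b : String) (a : String), Dom_getFinal b a → Spec_getFinal b a (getFinal b a)

-- ===== LEMMAS AND PROOFS =====
theorem getFinalLoop_ne (c : List Char) : ∀ d : List Char, d ≠ [] →
    getFinalLoop c d = (c.findIdx? pvIsDelim).map (fun i => String.mk (d ++ c.take i)) := by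
  induction c with
  | nil => intro d _; simp [getFinalLoop]
  | cons x rest ih =>
    intro d hd
    by_cases hx : pvIsDelim x
    · simp [getFinalLoop, hx, hd, List.findIdx?_cons]
    · simp only [getFinalLoop, hx, List.findIdx?_cons, Bool.false_eq_true, if_false]
      rw [ih (d ++ [x]) (by simp)]
      cases rest.findIdx? pvIsDelim <;> simp

theorem getFinalLoop_nil (c : List Char) :
    getFinalLoop c [] =
      (let c' := c.dropWhile pvIsDelim
       match c'.findIdx? pvIsDelim with
       | some i => some (String.mk (c'.take i))
       | none => none) := by
  induction c with
  | nil => simp [getFinalLoop]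
  | cons x rest ih =>
    by_cases hx : pvIsDelim x
    · simpa [getFinalLoop, hx, List.dropWhile_cons] using ih
    · simp only [getFinalLoop, hx, Bool.false_eq_true, if_false, List.dropWhile_cons, List.nil_append]
      rw [getFinalLoop_ne rest [x] (by simp)]
      simp only [List.findIdx?_cons, hx, Bool.false_eq_true, if_false]
      cases rest.findIdx? pvIsDelim <;> simp

-- ===== VERDICT (by name: the statement is the Claim_ definition above) =====
theorem getFinal_spec : Claim_equal_getFinal := by
  intro b a _
  unfold Spec_getFinal getFinal getFinal_alt
  exact getFinalLoop_nil _
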